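-- pv_equiv track=rewrite | github.com/Garkive/MSc_Thesis_Algorithm | DVRP_Version/DDestroyOps.py | display_routes
-- ===== SOURCE A (Python) =====
-- def display_routes(routes):
--      solution = []
--      for i in range(len(routes)):
--          hub_sol = []
--          route_sol = []
--          start_route = True
--          for j in range(len(routes[i])):
--              if routes[i][j] == i and start_route == False:
--                  route_sol.append(i)
--                  hub_sol.append(route_sol)
--                  route_sol = []
--                  start_route = True
--              if start_route:
--                  route_sol.append(i)
--                  start_route = False
--              else:
--                  route_sol.append(routes[i][j])
--          solution.append(hub_sol)
--      return solution
-- ===== SOURCE B (Python) =====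
-- def display_routes(routes):
--     def segments(i, rest):
--         if i not in rest:
--             return []
--         k = rest.index(i)
--         return [[i] + rest[:k] + [i]] + segments(i, rest[k+1:])
--     return [segments(i, r[1:]) for i, r in enumerate(routes)]
-- ===== Notes on version B (the rewrite author's own statement) =====
-- stated objective: alternative
-- what changed: A's single pass with a (hub_sol, route_sol, start_route) flag state machine is replaced by a recursive decomposition that finds the next delimiter with rest.index(i) and slices out each segment [i]+rest[:k]+[i], recursing on the remainder.
import Mathlib
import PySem

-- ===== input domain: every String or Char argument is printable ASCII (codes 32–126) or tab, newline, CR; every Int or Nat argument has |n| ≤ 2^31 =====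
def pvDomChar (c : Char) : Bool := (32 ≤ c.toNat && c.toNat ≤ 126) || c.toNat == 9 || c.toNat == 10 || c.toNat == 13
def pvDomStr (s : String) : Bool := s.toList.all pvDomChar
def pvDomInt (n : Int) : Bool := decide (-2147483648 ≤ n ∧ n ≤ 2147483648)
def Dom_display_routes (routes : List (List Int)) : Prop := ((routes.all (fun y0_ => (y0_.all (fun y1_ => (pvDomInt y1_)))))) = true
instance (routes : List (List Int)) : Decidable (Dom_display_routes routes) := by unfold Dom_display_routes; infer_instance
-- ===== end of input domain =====

-- B replaces A's per-element flag state machine by recursively carving out the segment up to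
-- the next delimiter with index/slice (objective: alternative decomposition, same asymptotic cost).

-- ===== PORT A =====
-- one inner-loop iteration of A (the two ifs on the state (hub_sol, route_sol, start_route))
def stepA (i : Int) (s : List (List Int) × List Int × Bool) (x : Int) :
    List (List Int) × List Int × Bool :=
  let s := if x = i ∧ s.2.2 = false then (s.1 ++ [s.2.1 ++ [i]], ([] : List Int), true) else s
  if s.2.2 = true then (s.1, s.2.1 ++ [i], false) else (s.1, s.2.1 ++ [x], false)

def display_routes (routes : List (List Int)) : List (List (List Int)) :=
  (PySem.List.pyRange 0 (routes.length : Int) 1).foldl (fun solution i =>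
    solution ++ [((PySem.List.pyRange 0 ((PySem.List.pyGetD routes i []).length : Int) 1).foldl
        (fun s j => stepA i s (PySem.List.pyGetD (PySem.List.pyGetD routes i []) j 0))
        ([], [], true)).1]) []

-- ===== PORT B =====
-- Source B's `segments`: the `if i in rest` membership test + `rest.index(i)` are ported as one
-- match on PySem.List.index? (some ↔ member, exactly Python's index of the first occurrence)
-- structural recursion with fuel = rest.length (a totality guard only: each recursive
-- call drops at least one element, so the fuel never runs out on the recursion's inputs)
def segAuxB (i : Int) : Nat → List Int → List (List Int)
  | 0, _ => []
  | fuel + 1, rest =>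
    match PySem.List.index? rest i with
    | none => []
    | some k =>
        ([i] ++ PySem.List.slice rest none (some (k : Int)) ++ [i])
          :: segAuxB i fuel (PySem.List.slice rest (some ((k : Int) + 1)) none)

def segmentsB (i : Int) (rest : List Int) : List (List Int) := segAuxB i rest.length rest

def display_routes_alt (routes : List (List Int)) : List (List (List Int)) :=
  (PySem.List.enumerate routes 0).map
    (fun p => segmentsB p.1 (PySem.List.slice p.2 (some 1) none))

-- ===== PRECONDITION & SPEC =====
def Spec_display_routes (routes : List (List Int)) (out : List (List (List Int))) : Prop := out = display_routes_alt routes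
instance (routes : List (List Int)) (out : List (List (List Int))) : Decidable (Spec_display_routes routes out) := by unfold Spec_display_routes; infer_instance

-- ===== CLAIM (what is proved, stated in full; the proofs are below) =====
def Claim_equal_display_routes : Prop := ∀ (routes : List (List Int)), Dom_display_routes routes → Spec_display_routes routes (display_routes routes)

-- ===== LEMMAS AND PROOFS =====

-- proof-side characterisation of A's inner loop once start_route is False:
-- the segments produced from the rest of the route, with `cur` the open segment
def gSeg (i : Int) (cur : List Int) : List Int → List (List Int)
  | [] => []
  | x :: xs => if x = i then (cur ++ [i]) :: gSeg i [i] xs else gSeg i (cur ++ [x]) xs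

lemma stepA_false (i : Int) (hub : List (List Int)) (cur : List Int) (x : Int) :
    stepA i (hub, cur, false) x =
      if x = i then (hub ++ [cur ++ [i]], [i], false) else (hub, cur ++ [x], false) := by
  by_cases hx : x = i <;> simp [stepA, hx]

lemma foldl_stepA_false (i : Int) (xs : List Int) :
    ∀ (hub : List (List Int)) (cur : List Int),
      (xs.foldl (stepA i) (hub, cur, false)).1 = hub ++ gSeg i cur xs := by
  induction xs with
  | nil => intro hub cur; simp [gSeg]
  | cons x xs ih =>
    intro hub cur
    by_cases hx : x = i <;>
      simp [List.foldl_cons, stepA_false, hx, gSeg, ih]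

-- gSeg via the first index of the delimiter
lemma gSeg_char (i : Int) (xs : List Int) :
    ∀ cur : List Int,
      gSeg i cur xs =
        match PySem.List.index? xs i with
        | none => []
        | some k => (cur ++ xs.take k ++ [i]) :: gSeg i [i] (xs.drop (k + 1)) := by
  induction xs with
  | nil => intro cur; simp [gSeg, PySem.List.index?]
  | cons x xs ih =>
    intro cur
    by_cases hx : x = i
    · subst hx
      rw [PySem.List.index?_cons_self]
      simp [gSeg]
    · rw [PySem.List.index?_cons_of_ne xs hx]
      simp only [gSeg, if_neg hx, ih (cur ++ [x])]
      cases hidx : PySem.List.index? xs i with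
      | none => simp
      | some k => simp [List.take_succ_cons, List.drop_succ_cons, List.append_assoc]

-- segAuxB ignores the exact fuel as long as it is sufficient
lemma segAuxB_fuel (i : Int) : ∀ (f1 : Nat), ∀ (f2 : Nat) (xs : List Int),
    xs.length ≤ f1 → xs.length ≤ f2 → segAuxB i f1 xs = segAuxB i f2 xs := by
  intro f1
  induction f1 with
  | zero =>
    intro f2 xs h1 _
    have hxs : xs = [] := List.length_eq_zero_iff.mp (Nat.le_zero.mp h1)
    subst hxs
    cases f2 <;> simp [segAuxB, PySem.List.index?]
  | succ f1 ih =>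
    intro f2 xs h1 h2
    cases xs with
    | nil => cases f2 <;> simp [segAuxB, PySem.List.index?]
    | cons x xs' =>
      cases f2 with
      | zero => simp at h2
      | succ f2' =>
        simp only [segAuxB]
        cases hidx : PySem.List.index? (x :: xs') i with
        | none => rfl
        | some k =>
          obtain ⟨hk, -, -⟩ := PySem.List.getElem_of_index?_eq_some hidx
          have hdrop : PySem.List.slice (x :: xs') (some ((k : Int) + 1)) none
              = (x :: xs').drop (k + 1) := by
            rw [show ((k : Int) + 1) = ((k + 1 : Nat) : Int) by push_cast; ring,
              PySem.List.slice_from_natCast]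
          have htail := ih f2' ((x :: xs').drop (k + 1))
            (by simp only [List.length_drop]; simp at h1 hk ⊢; omega)
            (by simp only [List.length_drop]; simp at h2 hk ⊢; omega)
          simp [hdrop]
          simpa using htail

-- segmentsB's one-step unfolding, with the slices computed away
lemma segmentsB_eq (i : Int) (xs : List Int) :
    segmentsB i xs =
      match PySem.List.index? xs i with
      | none => []
      | some k => ([i] ++ xs.take k ++ [i]) :: segmentsB i (xs.drop (k + 1)) := by
  unfold segmentsB
  cases xs with
  | nil => simp [segAuxB, PySem.List.index?]
  | cons x xs' =>
    simp only [List.length_cons, segAuxB]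
    cases hidx : PySem.List.index? (x :: xs') i with
    | none => rfl
    | some k =>
      obtain ⟨hk, -, -⟩ := PySem.List.getElem_of_index?_eq_some hidx
      have hdrop : PySem.List.slice (x :: xs') (some ((k : Int) + 1)) none
          = (x :: xs').drop (k + 1) := by
        rw [show ((k : Int) + 1) = ((k + 1 : Nat) : Int) by push_cast; ring,
          PySem.List.slice_from_natCast]
      have hfuel := segAuxB_fuel i xs'.length ((x :: xs').drop (k + 1)).length
        ((x :: xs').drop (k + 1))
        (by simp only [List.length_drop, List.length_cons]; omega) le_rfl
      simp [PySem.List.slice_to_natCast, hdrop]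
      simpa using hfuel

lemma gSeg_eq_segmentsB (i : Int) (xs : List Int) : gSeg i [i] xs = segmentsB i xs := by
  induction hn : xs.length using Nat.strong_induction_on generalizing xs with
  | _ n ih =>
    rw [segmentsB_eq, gSeg_char]
    cases hidx : PySem.List.index? xs i with
    | none => rfl
    | some k =>
      obtain ⟨hk, -, -⟩ := PySem.List.getElem_of_index?_eq_some hidx
      have := ih ((xs.drop (k + 1)).length)
        (by simp only [List.length_drop]; omega) (xs.drop (k + 1)) rfl
      simp [this]

-- A's whole inner loop on a route r equals segmentsB on r's tail
lemma rowA_eq (i : Int) (r : List Int) :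
    ((PySem.List.pyRange 0 (r.length : Int) 1).foldl
        (fun s j => stepA i s (PySem.List.pyGetD r j 0)) ([], [], true)).1 =
      segmentsB i (PySem.List.slice r (some 1) none) := by
  rw [PySem.List.foldl_pyRange_zero_pyGetD' r 0 (stepA i) ([], [], true),
    PySem.List.slice_from_one]
  cases r with
  | nil => simp [segmentsB, segAuxB]
  | cons x xs =>
    have h0 : stepA i (([] : List (List Int)), ([] : List Int), true) x = ([], [i], false) := by
      simp [stepA]
    rw [List.foldl_cons, h0, foldl_stepA_false, gSeg_eq_segmentsB]
    rfl

-- ===== VERDICT (by name: the statement is the Claim_ definition above) =====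
theorem display_routes_spec : Claim_equal_display_routes := by
  intro routes _
  unfold Spec_display_routes display_routes display_routes_alt
  rw [PySem.List.enumerate_eq_map_pyRange routes ([] : List Int), List.map_map,
    PySem.List.foldl_append_singleton_eq_map]
  simp only [PySem.List.len_eq, List.nil_append]
  exact List.map_congr_left (fun j _ => rowA_eq j (PySem.List.pyGetD routes j []))
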